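-- pv_equiv track=rewrite | github.com/Tekhunt/Solutions | Cryptography/dictcom.py | dict_comp
-- ===== SOURCE A (Python) =====
-- def dict_comp(stop, step):
--     #floor division of step// stopto determine the range of the dictionery keys
--     floor_division = stop//step
--     #Multiplying the bove result by step to know the range of dictionery values
--     floor_division = floor_division*step
--     appender = []
--     #Looping through the perfect range of values without any remainder
--     for i in range(1, (stop//step)+1):
--         appender.append('item-'+str(i))
--     value_list = list(range(1, floor_division+1))
--
--     list_range = range(1, len((value_list))+1)
--     #Getting the chunk of data that will make individual dictionery values
--     data_chunk = [list_range[step*i:step*(i+1)] for i in range(len(list_range)//step+1)]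
--     data_chunk = data_chunk[:len(data_chunk)-1]
--     dict_values = []
--     #Arranging the data in a single list
--     for q in data_chunk:
--         dict_values.append(list(q))
--     #performing a dict comprehension to put it all together.
--     dict_result = {key:value for (key,value) in zip(appender, dict_values)}
--
--     return dict_result
-- ===== SOURCE B (Python) =====
-- def dict_comp(stop, step):
--     # Chunk i of the dictionary is the consecutive run step*(i-1)+1 .. step*i,
--     # computed directly by arithmetic; there are stop//step complete chunks.
--     return {'item-' + str(i): list(range(step * (i - 1) + 1, step * i + 1))
--             for i in range(1, stop // step + 1)}
-- ===== Notes on version B (the rewrite author's own statement) =====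
-- stated objective: simpler
-- what changed: Each value range is computed directly by arithmetic (chunk i is range(step*(i-1)+1, step*i+1)) in a single dict comprehension, instead of materializing a flat list, slicing it into chunks, dropping the last slice and zipping with a separately built key list; Pre_ excludes step==0, where A raises ZeroDivisionError, and negative step with stop <= step, an unspecified corner where A's empty dict (its key list zipped against an empty chunk list) is as accidental as B's keys-with-empty-ranges.
-- outside the precondition, e.g. on dict_comp(-10, -3): A returns {}, B returns {'item-1': [], 'item-2': [], 'item-3': []}; on dict_comp(10, 0): A raises ZeroDivisionError, B raises ZeroDivisionError
import Mathlib
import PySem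

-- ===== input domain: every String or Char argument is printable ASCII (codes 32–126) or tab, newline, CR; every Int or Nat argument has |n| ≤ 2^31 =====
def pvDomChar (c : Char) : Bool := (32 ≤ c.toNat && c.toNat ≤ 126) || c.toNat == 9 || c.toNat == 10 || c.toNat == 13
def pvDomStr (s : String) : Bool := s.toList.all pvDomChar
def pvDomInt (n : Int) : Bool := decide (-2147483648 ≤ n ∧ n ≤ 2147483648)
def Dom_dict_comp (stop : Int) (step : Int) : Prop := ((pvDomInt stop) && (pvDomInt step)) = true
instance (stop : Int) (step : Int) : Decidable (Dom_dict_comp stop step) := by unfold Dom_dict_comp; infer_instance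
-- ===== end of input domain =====

-- B computes each chunk directly as an arithmetic range in one dict comprehension, instead of
-- building a flat list, slicing it into chunks and zipping with a key list (objective: simpler).


-- ===== PORT A =====
def dict_comp (stop : Int) (step : Int) : List (String × List Int) :=
  let floor_division := PySem.Int.floordiv stop step
  let floor_division := floor_division * step
  let appender : List String :=
    (PySem.List.pyRange 1 (PySem.Int.floordiv stop step + 1) 1).foldl
      (fun acc i => acc ++ ["item-" ++ PySem.Int.toStr i]) []
  let value_list : List Int := PySem.List.pyRange 1 (floor_division + 1) 1
  let list_range : List Int := PySem.List.pyRange 1 ((value_list.length : Int) + 1) 1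
  let data_chunk : List (List Int) :=
    (PySem.List.pyRange 0 (PySem.Int.floordiv (list_range.length : Int) step + 1) 1).map
      (fun i => PySem.List.slice list_range (some (step * i)) (some (step * (i + 1))))
  let data_chunk :=
    PySem.List.slice data_chunk none (some ((data_chunk.length : Int) - 1))
  let dict_values : List (List Int) :=
    data_chunk.foldl (fun acc q => acc ++ [q]) []
  let dict_result : PySem.Dict String (List Int) :=
    (appender.zip dict_values).foldl (fun d p => d.insert p.1 p.2) PySem.Dict.empty
  dict_result.items

-- ===== PORT B =====
def dict_comp_alt (stop : Int) (step : Int) : List (String × List Int) :=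
  ((PySem.List.pyRange 1 (PySem.Int.floordiv stop step + 1) 1).foldl
    (fun d i => d.insert ("item-" ++ PySem.Int.toStr i)
                  (PySem.List.pyRange (step * (i - 1) + 1) (step * i + 1) 1))
    PySem.Dict.empty).items

-- ===== PRECONDITION & SPEC =====
-- Pre_ excludes step = 0, where the Python A raises ZeroDivisionError, and negative step with
-- stop ≤ step (so stop//step ≥ 1), an unspecified corner where A's empty dict (its key list
-- zipped against an empty chunk list) is as accidental as B's keys-with-empty-ranges.
def Pre_dict_comp (stop : Int) (step : Int) : Prop := step ≠ 0 ∧ (step < 0 → step < stop)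
instance (stop : Int) (step : Int) : Decidable (Pre_dict_comp stop step) := by unfold Pre_dict_comp; infer_instance
def pvWitness_dict_comp : Int × Int := (10, 3)

def Spec_dict_comp (stop : Int) (step : Int) (out : List (String × List Int)) : Prop := out = dict_comp_alt stop step
instance (stop : Int) (step : Int) (out : List (String × List Int)) : Decidable (Spec_dict_comp stop step out) := by unfold Spec_dict_comp; infer_instance

-- ===== CLAIM (what is proved, stated in full; the proofs are below) =====
def Claim_equal_dict_comp : Prop := ∀ (stop : Int) (step : Int), Dom_dict_comp stop step → Pre_dict_comp stop step → Spec_dict_comp stop step (dict_comp stop step)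

-- ===== LEMMAS AND PROOFS =====

lemma pyRange_one_drop (a b : Int) (k : Nat) :
    (PySem.List.pyRange a b 1).drop k = PySem.List.pyRange (a + k) b 1 := by
  apply List.ext_getElem
  · simp [PySem.List.length_pyRange_one]; omega
  · intro i h1 h2
    simp [PySem.List.getElem_pyRange_one]
    omega

lemma pyRange_one_take (a b : Int) (k : Nat) (h : a + k ≤ b) :
    (PySem.List.pyRange a b 1).take k = PySem.List.pyRange a (a + k) 1 := by
  apply List.ext_getElem
  · simp [PySem.List.length_pyRange_one]; omega
  · intro i h1 h2
    simp [PySem.List.getElem_pyRange_one]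

-- floordiv against a negative divisor
lemma floordiv_nonpos_of_neg (a b : Int) (hb : b < 0) (h : b < a) :
    PySem.Int.floordiv a b ≤ 0 := by
  by_contra hq
  push Not at hq
  have hm := PySem.Int.mod_neg_bounds a hb
  have he := PySem.Int.floordiv_mul_add_mod a b
  nlinarith [hm.1, hm.2]

-- A returns the empty dict whenever the step is negative.
lemma dict_comp_neg (stop step : Int) (h : step < 0) : dict_comp stop step = [] := by
  unfold dict_comp
  by_cases hfd : PySem.Int.floordiv stop step ≤ 0
  · rw [PySem.List.pyRange_one_eq_nil (by omega)]
    simp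
    rfl
  · have hfd' : 0 < PySem.Int.floordiv stop step := by omega
    have h1 : PySem.Int.floordiv stop step * step + 1 ≤ 1 := by nlinarith
    have hf0 : PySem.Int.floordiv 0 step = 0 := by simp [PySem.Int.floordiv]
    have hs : ∀ a b : Int, PySem.List.slice ([] : List Int) (some a) (some b) = [] := by
      intro a b; simp [PySem.List.slice]
    simp only [PySem.List.pyRange_one_eq_nil h1, List.length_nil, Nat.cast_zero, zero_add,
      PySem.List.pyRange_one_eq_nil (le_refl (1:Int)), hf0, hs]
    have hr : PySem.List.pyRange 0 1 1 = [0] := by decide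
    rw [hr]
    simp [List.zip_nil_right, PySem.List.slice]
    rfl

-- A returns the empty dict when there is no complete chunk (stop//step ≤ 0): no keys get built.
lemma dict_comp_pos_nil (stop step : Int)
    (hn : PySem.Int.floordiv stop step ≤ 0) : dict_comp stop step = [] := by
  unfold dict_comp
  rw [PySem.List.pyRange_one_eq_nil (by omega)]
  simp
  rfl

-- B returns the empty dict when the chunk count is not positive.
lemma dict_comp_alt_nil (stop step : Int)
    (h : PySem.Int.floordiv stop step ≤ 0) :
    dict_comp_alt stop step = [] := by
  unfold dict_comp_alt
  rw [PySem.List.pyRange_one_eq_nil (by omega)]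
  rfl

-- The positive case: stop//step = n > 0 complete chunks, chunk i = range(step*(i-1)+1, step*i+1).
lemma main_pos (stop step : Int) (hstep : 0 < step)
    (hn : 0 < PySem.Int.floordiv stop step) :
    dict_comp stop step = dict_comp_alt stop step := by
  unfold dict_comp dict_comp_alt
  set n := PySem.Int.floordiv stop step with hdefn
  have hns : 0 ≤ n * step := by positivity
  have hlen1 : ((PySem.List.pyRange 1 (n * step + 1) 1).length : Int) = n * step := by
    simp [PySem.List.length_pyRange_one]; omega
  simp only [hlen1]
  have hfd : PySem.Int.floordiv (n * step) step = n := by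
    rw [PySem.Int.floordiv_eq_iff_of_pos hstep]
    constructor
    · exact le_refl _
    · nlinarith
  simp only [hfd]
  have hN : ((n + 1 - 1).toNat : Int) = n := by omega
  have hlen2 : ((((PySem.List.pyRange 0 (n+1) 1).map
      (fun i => PySem.List.slice (PySem.List.pyRange 1 (n*step+1) 1)
        (some (step * i)) (some (step * (i + 1))))).length : Int)) = n + 1 := by
    simp [PySem.List.length_pyRange_one]; omega
  simp only [hlen2, add_sub_cancel_right]
  rw [PySem.List.slice_to _ (le_of_lt hn), ← List.map_take,
      pyRange_one_take 0 (n+1) n.toNat (by omega)]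
  have hz : (0:Int) + (n.toNat:Int) = n := by omega
  rw [hz]
  have hchunk : ∀ i ∈ PySem.List.pyRange 0 n 1,
      PySem.List.slice (PySem.List.pyRange 1 (n*step+1) 1)
        (some (step * i)) (some (step * (i + 1)))
      = PySem.List.pyRange (step * i + 1) (step * (i+1) + 1) 1 := by
    intro i hi
    rw [PySem.List.mem_pyRange_one] at hi
    have h0 : 0 ≤ step * i := mul_nonneg (le_of_lt hstep) hi.1
    have h1 : 0 ≤ step * (i + 1) := by nlinarith
    have hle : step * (i + 1) ≤ n * step := by nlinarith
    rw [PySem.List.slice_toNat _ h0 h1, pyRange_one_drop]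
    have hd : step * (i+1) = step * i + step := by ring
    rw [pyRange_one_take (1 + ((step*i).toNat:Int)) (n*step+1)
        ((step*(i+1)).toNat - (step*i).toNat) (by omega)]
    congr 1 <;> omega
  rw [List.map_congr_left hchunk]
  rw [PySem.List.foldl_append_singleton_eq_map, List.nil_append]
  simp only [PySem.List.foldl_append_singleton_eq_map (f := fun q => q), List.nil_append,
    List.map_id_fun', id]
  rw [PySem.List.pyRange_one 1 (n+1), PySem.List.pyRange_one 0 n]
  simp only [add_sub_cancel_right, sub_zero]
  simp only [List.map_map, List.zip_map', List.foldl_map]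
  apply congrArg
  apply PySem.List.foldl_congr_mem
  intro acc k _
  simp only [Function.comp]
  congr 1
  congr 1 <;> ring

-- ===== VERDICT (by name: the statement is the Claim_ definition above) =====
theorem dict_comp_spec : Claim_equal_dict_comp := by
  intro stop step _ hpre
  obtain ⟨h0, hneg⟩ := hpre
  unfold Spec_dict_comp
  rcases lt_trichotomy step 0 with h | h | h
  · rw [dict_comp_neg stop step h,
        dict_comp_alt_nil stop step (floordiv_nonpos_of_neg stop step h (hneg h))]
  · exact absurd h h0
  · by_cases hn : 0 < PySem.Int.floordiv stop step
    · exact main_pos stop step h hn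
    · rw [dict_comp_pos_nil stop step (by omega), dict_comp_alt_nil stop step (by omega)]
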